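-- pv_equiv track=rewrite | github.com/MasonBoom/AI-connect-four | main/connect_four.py | count_streaks
-- ===== SOURCE A (Python) =====
-- def count_streaks(board, symbol):
--     count = 0
--     for col in range(len(board)):
--         for row in range(len(board[0])):
--             if board[col][row] == symbol:
--                 if col < len(board) - 3 and all(board[col+i][row] == symbol for i in range(4)):
--                     count += 1
--                 if row < len(board[0]) - 3 and all(board[col][row+i] == symbol for i in range(4)):
--                     count += 1
--     return count
-- ===== SOURCE B (Python) =====
-- def count_streaks(board, symbol):
--     if not board:
--         return 0
--     width = len(board[0])
--     total = 0
--     # streaks along each inner list (board[col][row..row+3])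
--     for line in board:
--         run = 0
--         for j in range(width):
--             run = run + 1 if line[j] == symbol else 0
--             if run >= 4:
--                 total += 1
--     # streaks across the outer list at each fixed inner index
--     for j in range(width):
--         run = 0
--         for line in board:
--             run = run + 1 if line[j] == symbol else 0
--             if run >= 4:
--                 total += 1
--     return total
-- ===== Notes on version B (the rewrite author's own statement) =====
-- stated objective: alternative
-- what changed: Replaces the per-cell 4-window all(...) membership checks with two run-length-counter passes (one along each inner list, one across the outer list per column), each length-L run contributing L-3 counts.
import Mathlib
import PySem

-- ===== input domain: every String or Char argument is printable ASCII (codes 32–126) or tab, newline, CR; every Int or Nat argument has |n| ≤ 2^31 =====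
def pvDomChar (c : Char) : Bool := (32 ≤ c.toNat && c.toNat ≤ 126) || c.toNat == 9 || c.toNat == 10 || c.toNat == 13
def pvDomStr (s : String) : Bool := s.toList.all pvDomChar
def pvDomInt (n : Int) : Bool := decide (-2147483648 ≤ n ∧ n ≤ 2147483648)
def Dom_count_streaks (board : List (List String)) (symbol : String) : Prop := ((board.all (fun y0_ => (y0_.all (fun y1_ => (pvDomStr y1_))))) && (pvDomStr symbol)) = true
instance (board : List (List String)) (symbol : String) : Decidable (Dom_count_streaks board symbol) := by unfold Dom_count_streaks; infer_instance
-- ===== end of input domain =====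

-- B replaces A's per-cell 4-window all(...) checks by two run-length-counter passes (a
-- length-L run contributes L-3 counts): a different decomposition of the same count.

-- ===== PORT A =====
def count_streaks (board : List (List String)) (symbol : String) : Int :=
  (List.range board.length).foldl (fun count col =>
    (List.range (board.headD []).length).foldl (fun count row =>
      if (board.getD col []).getD row "" == symbol then
        let count := if decide (col + 3 < board.length) &&
            (List.range 4).all (fun i => (board.getD (col + i) []).getD row "" == symbol)
          then count + 1 else count
        if decide (row + 3 < (board.headD []).length) &&
            (List.range 4).all (fun i => (board.getD col []).getD (row + i) "" == symbol)
          then count + 1 else count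
      else count) count) 0

-- ===== PORT B =====
def count_streaks_alt (board : List (List String)) (symbol : String) : Int :=
  if board.isEmpty then 0
  else
    let width := (board.headD []).length
    let total : Int := board.foldl (fun total line =>
      ((List.range width).foldl (fun (p : Int × Nat) j =>
          let run := if line.getD j "" == symbol then p.2 + 1 else 0
          (if 4 ≤ run then p.1 + 1 else p.1, run)) (total, 0)).1) 0
    (List.range width).foldl (fun total j =>
      (board.foldl (fun (p : Int × Nat) line =>
          let run := if line.getD j "" == symbol then p.2 + 1 else 0
          (if 4 ≤ run then p.1 + 1 else p.1, run)) (total, 0)).1) total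

-- ===== PRECONDITION & SPEC =====
-- Pre_ excludes exactly the ragged boards on which some row is shorter than the first
-- row: there the Python A (and B) raises IndexError.
def Pre_count_streaks (board : List (List String)) (symbol : String) : Prop :=
  ∀ r ∈ board, (board.headD []).length ≤ r.length
instance (board : List (List String)) (symbol : String) : Decidable (Pre_count_streaks board symbol) := by unfold Pre_count_streaks; infer_instance
def pvWitness_count_streaks : List (List String) × String := ([["x", "o"], ["x", "x"]], "x")
def Spec_count_streaks (board : List (List String)) (symbol : String) (out : Int) : Prop := out = count_streaks_alt board symbol
instance (board : List (List String)) (symbol : String) (out : Int) : Decidable (Spec_count_streaks board symbol out) := by unfold Spec_count_streaks; infer_instance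

-- ===== CLAIM (what is proved, stated in full; the proofs are below) =====
def Claim_equal_count_streaks : Prop := ∀ (board : List (List String)) (symbol : String), Dom_count_streaks board symbol → Pre_count_streaks board symbol → Spec_count_streaks board symbol (count_streaks board symbol)

-- ===== LEMMAS AND PROOFS =====

-- first four elements exist and are all `true`
def hasTrue4 (l : List Bool) : Bool :=
  decide (4 ≤ l.length) && l.getD 0 false && l.getD 1 false && l.getD 2 false && l.getD 3 false

-- window count: number of suffixes starting with four `true`s
def wcB : List Bool → Nat
  | [] => 0
  | b :: t => (if hasTrue4 (b :: t) then 1 else 0) + wcB t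

-- run-length tally: r = current run of `true`s
def tallyN : Nat → List Bool → Nat
  | _, [] => 0
  | r, b :: t => (if 4 ≤ (if b then r + 1 else 0) then 1 else 0) + tallyN (if b then r + 1 else 0) t

theorem scan_eq_tally {α : Type} (xs : List α) (f : α → Bool) (total : Int) (r : Nat) :
    (xs.foldl (fun (p : Int × Nat) x =>
        let run := if f x then p.2 + 1 else 0
        (if 4 ≤ run then p.1 + 1 else p.1, run)) (total, r)).1
      = total + (tallyN r (xs.map f) : Int) := by
  induction xs generalizing total r with
  | nil => simp [tallyN]
  | cons x t ih =>
    simp only [List.foldl_cons, List.map_cons, tallyN]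
    rw [ih]
    split_ifs <;> push_cast <;> ring

theorem replicate_succ_append {α : Type} (r : Nat) (a : α) (t : List α) :
    List.replicate r a ++ a :: t = List.replicate (r + 1) a ++ t := by
  rw [List.replicate_succ', List.append_assoc]; rfl

theorem tally_eq_wc (l : List Bool) (r : Nat) :
    tallyN r l = wcB (List.replicate (min r 3) true ++ l) := by
  induction l generalizing r with
  | nil =>
    have h : min r 3 ≤ 3 := Nat.min_le_right r 3
    simp only [tallyN, List.append_nil]
    interval_cases h : min r 3 <;> simp [wcB, hasTrue4, List.replicate]
  | cons b t ih =>
    cases b with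
    | false =>
      simp only [tallyN, if_neg (by omega : ¬ (4:Nat) ≤ 0), Bool.false_eq_true, if_false]
      rw [ih 0]
      simp only [Nat.zero_min, List.replicate, List.nil_append, Nat.zero_add]
      have h : min r 3 ≤ 3 := Nat.min_le_right r 3
      interval_cases h : min r 3 <;>
        simp [wcB, hasTrue4, List.replicate, List.getD]
    | true =>
      simp only [tallyN, if_pos trivial]
      rw [ih (r + 1)]
      rcases Nat.lt_or_ge r 3 with hr | hr
      · have h1 : min r 3 = r := by omega
        have h2 : min (r + 1) 3 = r + 1 := by omega
        have h3 : ¬ (4 ≤ r + 1) := by omega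
        rw [h1, h2, if_neg h3, replicate_succ_append]
        omega
      · have h1 : min r 3 = 3 := by omega
        have h2 : min (r + 1) 3 = 3 := by omega
        have h3 : (4 ≤ r + 1) := by omega
        rw [h1, h2, if_pos h3]
        show 1 + wcB (List.replicate 3 true ++ t) = wcB (List.replicate 3 true ++ true :: t)
        have e1 : (List.replicate 3 true ++ true :: t) = true :: true :: true :: true :: t := by
          simp [List.replicate]
        have e2 : (List.replicate 3 true ++ t) = true :: true :: true :: t := by
          simp [List.replicate]
        rw [e1, e2]
        have e3 : wcB (true :: true :: true :: true :: t)
            = (if hasTrue4 (true :: true :: true :: true :: t) then 1 else 0)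
              + wcB (true :: true :: true :: t) := rfl
        have e4 : hasTrue4 (true :: true :: true :: true :: t) = true := by
          simp [hasTrue4, List.getD]
        rw [e3, e4]
        simp

theorem sum_drop_eq_wc (l : List Bool) :
    (∑ s ∈ Finset.range l.length, (if hasTrue4 (l.drop s) then (1 : Int) else 0)) = (wcB l : Int) := by
  induction l with
  | nil => simp [wcB]
  | cons b t ih =>
    rw [List.length_cons, Finset.sum_range_succ']
    simp only [List.drop_succ_cons, List.drop_zero]
    rw [wcB]
    push_cast
    rw [add_comm]
    congr 1

theorem getD_drop {α : Type} (l : List α) (m i : Nat) (d : α) :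
    (l.drop m).getD i d = l.getD (m + i) d := by
  simp [List.getD_eq_getElem?_getD, List.getElem?_drop]

theorem getD_map_range' {α : Type} (n k : Nat) (f : Nat → α) (d : α) :
    ((List.range n).map f).getD k d = if k < n then f k else d := by
  rcases Nat.lt_or_ge k n with h | h
  · rw [if_pos h, List.getD_eq_getElem?_getD, List.getElem?_map]
    rw [List.getElem?_range h]
    rfl
  · rw [if_neg (by omega)]
    have hnone : ((List.range n).map f)[k]? = none := List.getElem?_eq_none (by simpa using h)
    simp [List.getD_eq_getElem?_getD, hnone]

theorem map_eq_map_range_getD {α β : Type} (l : List α) (g : α → β) (d : α) :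
    l.map g = (List.range l.length).map (fun i => g (l.getD i d)) := by
  induction l with
  | nil => simp
  | cons a t ih =>
    rw [List.length_cons, List.range_succ_eq_map, List.map_cons, List.map_cons, List.map_map]
    simp only [List.getD_cons_zero]
    congr 1

theorem list_sum_range_eq (n : Nat) (f : Nat → Int) :
    ((List.range n).map f).sum = ∑ i ∈ Finset.range n, f i := by
  induction n with
  | zero => simp
  | succ m ih => rw [List.range_succ, Finset.sum_range_succ, List.map_append, List.sum_append, ih]; simp

-- the 4-window condition of A at start s of a range-indexed boolean line
theorem window_eq_hasTrue4 (n s : Nat) (f : Nat → Bool) :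
    (decide (s + 3 < n) && (List.range 4).all (fun i => f (s + i)))
      = hasTrue4 (((List.range n).map f).drop s) := by
  have hrange4 : List.range 4 = [0, 1, 2, 3] := rfl
  have hlen : (((List.range n).map f).drop s).length = n - s := by simp
  by_cases h : s + 3 < n
  · simp only [hasTrue4, hlen, getD_drop, getD_map_range', hrange4]
    have h0 : s + 0 < n := by omega
    have h1 : s + 1 < n := by omega
    have h2 : s + 2 < n := by omega
    have h3 : s + 3 < n := by omega
    simp [h, h1, h2, Bool.and_assoc, (by omega : 4 ≤ n - s)]
    all_goals (intros; omega)
  · simp only [hasTrue4, hlen]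
    have : ¬ (4 ≤ n - s) := by omega
    simp [h, this]

theorem count_streaks_eq_sum (board : List (List String)) (symbol : String) :
    count_streaks board symbol
      = (∑ col ∈ Finset.range board.length,
          (wcB ((List.range (board.headD []).length).map
            (fun j => (board.getD col []).getD j "" == symbol)) : Int))
        + ∑ j ∈ Finset.range (board.headD []).length,
          (wcB ((List.range board.length).map
            (fun i => (board.getD i []).getD j "" == symbol)) : Int) := by
  set H := board.length with hH
  set w := (board.headD []).length with hw
  set f : Nat → Nat → Bool := fun i j => (board.getD i []).getD j "" == symbol with hf
  have hbody : ∀ col : Nat, (fun (count : Int) row =>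
      if (board.getD col []).getD row "" == symbol then
        let count := if decide (col + 3 < board.length) &&
            (List.range 4).all (fun i => (board.getD (col + i) []).getD row "" == symbol)
          then count + 1 else count
        if decide (row + 3 < (board.headD []).length) &&
            (List.range 4).all (fun i => (board.getD col []).getD (row + i) "" == symbol)
          then count + 1 else count
      else count)
    = fun (count : Int) row => count +
        ((if hasTrue4 (((List.range H).map (fun i => f i row)).drop col) then (1:Int) else 0)
         + (if hasTrue4 (((List.range w).map (f col)).drop row) then (1:Int) else 0)) := by
    intro col
    funext count row
    have hv : (decide (col + 3 < H) && (List.range 4).all (fun i => f (col + i) row))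
        = hasTrue4 (((List.range H).map (fun i => f i row)).drop col) :=
      window_eq_hasTrue4 H col (fun i => f i row)
    have hh : (decide (row + 3 < w) && (List.range 4).all (fun i => f col (row + i)))
        = hasTrue4 (((List.range w).map (f col)).drop row) :=
      window_eq_hasTrue4 w row (f col)
    by_cases hc : f col row = true
    · rw [show ((board.getD col []).getD row "" == symbol) = f col row from rfl, hc]
      simp only [← hv, ← hh, ← hH, ← hw]
      split_ifs <;> ring
    · rw [Bool.not_eq_true] at hc
      rw [show ((board.getD col []).getD row "" == symbol) = f col row from rfl, hc]
      have hv0 : hasTrue4 (((List.range H).map (fun i => f i row)).drop col) = false := by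
        rw [← hv]
        simp [show List.range 4 = [0,1,2,3] from rfl, hc]
      have hh0 : hasTrue4 (((List.range w).map (f col)).drop row) = false := by
        rw [← hh]
        simp [show List.range 4 = [0,1,2,3] from rfl, hc]
      simp [hv0, hh0]
  unfold count_streaks
  rw [show (List.range (board.headD []).length) = List.range w from rfl,
      show (List.range board.length) = List.range H from rfl]
  calc (List.range H).foldl (fun count col => (List.range w).foldl _ count) 0
      = (List.range H).foldl (fun count col => count +
          ((List.range w).map (fun row =>
            (if hasTrue4 (((List.range H).map (fun i => f i row)).drop col) then (1:Int) else 0)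
            + (if hasTrue4 (((List.range w).map (f col)).drop row) then (1:Int) else 0))).sum) 0 := by
        apply PySem.List.foldl_congr_mem
        intro count col _
        rw [hbody col, PySem.List.foldl_add]
    _ = ((List.range H).map (fun col => ((List.range w).map (fun row =>
            (if hasTrue4 (((List.range H).map (fun i => f i row)).drop col) then (1:Int) else 0)
            + (if hasTrue4 (((List.range w).map (f col)).drop row) then (1:Int) else 0))).sum)).sum := by
        rw [PySem.List.foldl_add]; simp
    _ = ∑ col ∈ Finset.range H, ∑ row ∈ Finset.range w,
          ((if hasTrue4 (((List.range H).map (fun i => f i row)).drop col) then (1:Int) else 0)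
            + (if hasTrue4 (((List.range w).map (f col)).drop row) then (1:Int) else 0)) := by
        rw [list_sum_range_eq]
        exact Finset.sum_congr rfl (fun col _ => list_sum_range_eq w _)
    _ = (∑ j ∈ Finset.range w, (wcB ((List.range H).map (fun i => f i j)) : Int))
        + ∑ col ∈ Finset.range H, (wcB ((List.range w).map (f col)) : Int) := by
        simp only [Finset.sum_add_distrib]
        congr 1
        · rw [Finset.sum_comm]
          exact Finset.sum_congr rfl (fun j _ => by
            have := sum_drop_eq_wc ((List.range H).map (fun i => f i j))
            simpa using this)
        · exact Finset.sum_congr rfl (fun col _ => by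
            have := sum_drop_eq_wc ((List.range w).map (f col))
            simpa using this)
    _ = (∑ col ∈ Finset.range H, (wcB ((List.range w).map (f col)) : Int))
        + ∑ j ∈ Finset.range w, (wcB ((List.range H).map (fun i => f i j)) : Int) := add_comm _ _

theorem count_streaks_alt_eq_sum (board : List (List String)) (symbol : String) :
    count_streaks_alt board symbol
      = (∑ col ∈ Finset.range board.length,
          (wcB ((List.range (board.headD []).length).map
            (fun j => (board.getD col []).getD j "" == symbol)) : Int))
        + ∑ j ∈ Finset.range (board.headD []).length,
          (wcB ((List.range board.length).map
            (fun i => (board.getD i []).getD j "" == symbol)) : Int) := by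
  unfold count_streaks_alt
  by_cases hb : board.isEmpty
  · rw [if_pos hb]
    rw [List.isEmpty_iff] at hb
    subst hb
    simp
  · rw [if_neg hb]
    show ((List.range (board.headD []).length).foldl
        (fun (total : Int) j =>
          (board.foldl (fun (p : Int × Nat) line =>
            let run := if line.getD j "" == symbol then p.2 + 1 else 0
            (if 4 ≤ run then p.1 + 1 else p.1, run)) (total, 0)).1)
        (board.foldl (fun (total : Int) line =>
          ((List.range (board.headD []).length).foldl (fun (p : Int × Nat) j =>
            let run := if line.getD j "" == symbol then p.2 + 1 else 0
            (if 4 ≤ run then p.1 + 1 else p.1, run)) (total, 0)).1) 0))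
      = _
    have pass1 : board.foldl (fun (total : Int) line =>
          ((List.range (board.headD []).length).foldl (fun (p : Int × Nat) j =>
            let run := if line.getD j "" == symbol then p.2 + 1 else 0
            (if 4 ≤ run then p.1 + 1 else p.1, run)) (total, 0)).1) 0
      = ∑ col ∈ Finset.range board.length, (wcB ((List.range (board.headD []).length).map
          (fun j => (board.getD col []).getD j "" == symbol)) : Int) := by
      have hstep : (fun (total : Int) (line : List String) =>
          ((List.range (board.headD []).length).foldl (fun (p : Int × Nat) j =>
            let run := if line.getD j "" == symbol then p.2 + 1 else 0
            (if 4 ≤ run then p.1 + 1 else p.1, run)) (total, 0)).1)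
        = fun (total : Int) line => total +
            ((tallyN 0 ((List.range (board.headD []).length).map
              (fun j => line.getD j "" == symbol)) : Nat) : Int) := by
        funext total line
        exact scan_eq_tally _ _ total 0
      rw [hstep, PySem.List.foldl_add,
        map_eq_map_range_getD board (fun line => ((tallyN 0 ((List.range (board.headD []).length).map
          (fun j => line.getD j "" == symbol)) : Nat) : Int)) [],
        list_sum_range_eq, zero_add]
      exact Finset.sum_congr rfl (fun col _ => by rw [tally_eq_wc]; simp)
    rw [pass1]
    have hstep2 : (fun (total : Int) (j : Nat) =>
        (board.foldl (fun (p : Int × Nat) line =>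
          let run := if line.getD j "" == symbol then p.2 + 1 else 0
          (if 4 ≤ run then p.1 + 1 else p.1, run)) (total, 0)).1)
      = fun (total : Int) j => total +
          ((tallyN 0 (board.map (fun line => line.getD j "" == symbol)) : Nat) : Int) := by
      funext total j
      exact scan_eq_tally board (fun line => line.getD j "" == symbol) total 0
    rw [hstep2, PySem.List.foldl_add, list_sum_range_eq]
    congr 1
    exact Finset.sum_congr rfl (fun j _ => by
      rw [tally_eq_wc, map_eq_map_range_getD board (fun line => (line.getD j "" == symbol)) []]
      simp)

-- ===== VERDICT (by name: the statement is the Claim_ definition above) =====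
theorem count_streaks_spec : Claim_equal_count_streaks := by
  intro board symbol _ _
  unfold Spec_count_streaks
  rw [count_streaks_eq_sum, count_streaks_alt_eq_sum]
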